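-- pv_equiv track=rewrite | github.com/Gianni-G/semiolog | wip/temp.py | findall_contexts_list
-- ===== SOURCE A (Python) =====
-- from collections import Counter
--
-- def findall_contexts_list(chain_list,best_pair,encode):
--
--     merge_context_count_l = Counter()
--     merge_context_count_r = Counter()
--     pair_pair_count = 0
--     pair_pair_overlap_control = [-4]
--
--     for j,(a,b,c,d) in enumerate(zip(*[chain_list[i:] for i in range(4)])):
--         if (b,c) == best_pair:
--             merge_context_count_l[encode[a]] += 1
--             merge_context_count_r[encode[d]] += 1
--
--         # compute #(l,r)-(l,r)
--         if (a,b,c,d) == best_pair*2 and j-pair_pair_overlap_control[-1]>3: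
--             pair_pair_count += 1
--             pair_pair_overlap_control.append(j)
--
--     return merge_context_count_l, merge_context_count_r, pair_pair_count
-- ===== SOURCE B (Python) =====
-- from collections import Counter
--
-- def findall_contexts_list(chain_list, best_pair, encode):
--     n = len(chain_list)
--     # pass 1: all pair-start indices
--     starts = [i for i in range(n - 1) if (chain_list[i], chain_list[i + 1]) == best_pair]
--     start_set = set(starts)
--     # pass 2: interior pair starts (a left and a right neighbour both exist)
--     interior = [i for i in range(1, n - 2) if (chain_list[i], chain_list[i + 1]) == best_pair]
--     left = Counter(encode[chain_list[i - 1]] for i in interior)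
--     right = Counter(encode[chain_list[i + 2]] for i in interior)
--     # pass 3: greedy non-overlapping double-pair windows
--     count = 0
--     last = -4
--     for p in starts:
--         if p + 2 in start_set and p - last > 3:
--             count += 1
--             last = p
--     return left, right, count
-- ===== Notes on version B (the rewrite author's own statement) =====
-- stated objective: alternative
-- what changed: A's single enumerated zip-of-four-slices fold with a Counter pair and an overlap-control list is replaced by three independent passes: a pair-start index scan, neighbour-counting Counters built from the interior pair starts, and a greedy double-pair scan keeping only a scalar last-accepted index.
import Mathlib
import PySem

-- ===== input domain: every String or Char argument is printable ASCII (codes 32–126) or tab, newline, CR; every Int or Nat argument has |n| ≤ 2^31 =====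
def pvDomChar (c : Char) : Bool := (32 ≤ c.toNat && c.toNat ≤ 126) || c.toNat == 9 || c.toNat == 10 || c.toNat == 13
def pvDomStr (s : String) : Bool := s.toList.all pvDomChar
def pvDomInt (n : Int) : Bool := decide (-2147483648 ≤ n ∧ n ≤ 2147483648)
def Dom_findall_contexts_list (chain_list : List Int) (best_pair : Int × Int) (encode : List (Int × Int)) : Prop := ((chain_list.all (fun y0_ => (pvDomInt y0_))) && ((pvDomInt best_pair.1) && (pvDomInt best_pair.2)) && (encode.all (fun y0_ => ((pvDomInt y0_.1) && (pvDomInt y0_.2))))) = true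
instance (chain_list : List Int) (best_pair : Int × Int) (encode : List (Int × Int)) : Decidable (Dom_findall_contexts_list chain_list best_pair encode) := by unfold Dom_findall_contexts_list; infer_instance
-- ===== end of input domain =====

-- B replaces A's single enumerated 4-window fold by three independent passes (pair-start scan,
-- interior-neighbour counting, greedy double-pair scan with a scalar last-index); objective: alternative decomposition.
-- Where Python raises KeyError on encode (excluded by Pre_), both ports use a default the proof never relies on.

-- ===== PORT A =====
-- encode[k]: Python dict lookup (first match); none = KeyError, excluded by Pre_; the 0 default is never consulted there
def pvEnc (encode : List (Int × Int)) (k : Int) : Int :=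
  ((PySem.Dict.mk encode).get? k).getD 0

-- zip(*[chain_list[i:] for i in range(4)]): chain_list[i:] with i ≥ 0 is List.drop i (exact), zip truncates like Python's
def pvWindows (cl : List Int) : List (Int × Int × Int × Int) :=
  cl.zip ((cl.drop 1).zip ((cl.drop 2).zip (cl.drop 3)))

def findall_contexts_list (chain_list : List Int) (best_pair : Int × Int) (encode : List (Int × Int)) : (List (Int × Int)) × (List (Int × Int)) × Int :=
  let st := (PySem.List.enumerate (pvWindows chain_list) 0).foldl
    (fun st jw =>
      let j := jw.1; let a := jw.2.1; let b := jw.2.2.1; let c := jw.2.2.2.1; let d := jw.2.2.2.2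
      -- if (b,c) == best_pair: two Counter increments
      let lr := if (b, c) = best_pair
        then (st.1.modify (pvEnc encode a) 0 (· + 1), st.2.1.modify (pvEnc encode d) 0 (· + 1))
        else (st.1, st.2.1)
      -- if (a,b,c,d) == best_pair*2 and j - pair_pair_overlap_control[-1] > 3
      let cc := if (a, b, c, d) = (best_pair.1, best_pair.2, best_pair.1, best_pair.2) ∧
                   j - PySem.List.pyGetD st.2.2.2 (-1) 0 > 3
        then (st.2.2.1 + 1, st.2.2.2 ++ [j]) else (st.2.2.1, st.2.2.2)
      (lr.1, lr.2, cc.1, cc.2))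
    ((PySem.Dict.empty : PySem.Dict Int Int), (PySem.Dict.empty : PySem.Dict Int Int), (0 : Int), [(-4 : Int)])
  (st.1.items, st.2.1.items, st.2.2.1)

-- ===== PORT B =====
def findall_contexts_list_alt (chain_list : List Int) (best_pair : Int × Int) (encode : List (Int × Int)) : (List (Int × Int)) × (List (Int × Int)) × Int :=
  let n : Int := chain_list.length
  -- pass 1: all pair-start indices
  let starts := (PySem.List.pyRange 0 (n - 1) 1).filter
    (fun i => (PySem.List.pyGetD chain_list i 0, PySem.List.pyGetD chain_list (i + 1) 0) = best_pair)
  -- pass 2: interior pair starts (left and right neighbour both exist)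
  let interior := (PySem.List.pyRange 1 (n - 2) 1).filter
    (fun i => (PySem.List.pyGetD chain_list i 0, PySem.List.pyGetD chain_list (i + 1) 0) = best_pair)
  let left := PySem.Dict.counter (interior.map (fun i => pvEnc encode (PySem.List.pyGetD chain_list (i - 1) 0)))
  let right := PySem.Dict.counter (interior.map (fun i => pvEnc encode (PySem.List.pyGetD chain_list (i + 2) 0)))
  -- pass 3: greedy non-overlapping double-pair windows, scalar last-accepted index
  let cc := starts.foldl
    (fun p i => if (i + 2) ∈ starts ∧ i - p.2 > 3 then (p.1 + 1, i) else p)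
    ((0 : Int), (-4 : Int))
  (left.items, right.items, cc.1)

-- ===== PRECONDITION & SPEC =====
-- Pre_ excludes exactly the inputs where Python A raises KeyError: a matched pair whose left or
-- right neighbour is not a key of encode.
def Pre_findall_contexts_list (chain_list : List Int) (best_pair : Int × Int) (encode : List (Int × Int)) : Prop :=
  ∀ i ∈ List.range (chain_list.length - 3),
    (chain_list.getD (i + 1) 0, chain_list.getD (i + 2) 0) = best_pair →
      chain_list.getD i 0 ∈ encode.map Prod.fst ∧ chain_list.getD (i + 3) 0 ∈ encode.map Prod.fst
instance (chain_list : List Int) (best_pair : Int × Int) (encode : List (Int × Int)) : Decidable (Pre_findall_contexts_list chain_list best_pair encode) := by unfold Pre_findall_contexts_list; infer_instance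
def pvWitness_findall_contexts_list : List Int × (Int × Int) × (List (Int × Int)) :=
  ([1, 2, 3, 4], (2, 3), [(1, 10), (4, 11)])
def Spec_findall_contexts_list (chain_list : List Int) (best_pair : Int × Int) (encode : List (Int × Int)) (out : (List (Int × Int)) × (List (Int × Int)) × Int) : Prop := out = findall_contexts_list_alt chain_list best_pair encode
instance (chain_list : List Int) (best_pair : Int × Int) (encode : List (Int × Int)) (out : (List (Int × Int)) × (List (Int × Int)) × Int) : Decidable (Spec_findall_contexts_list chain_list best_pair encode out) := by unfold Spec_findall_contexts_list; infer_instance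

-- ===== CLAIM (what is proved, stated in full; the proofs are below) =====
def Claim_equal_findall_contexts_list : Prop := ∀ (chain_list : List Int) (best_pair : Int × Int) (encode : List (Int × Int)), Dom_findall_contexts_list chain_list best_pair encode → Pre_findall_contexts_list chain_list best_pair encode → Spec_findall_contexts_list chain_list best_pair encode (findall_contexts_list chain_list best_pair encode)

-- ===== LEMMAS AND PROOFS =====

-- proof-only abbreviations (Nat-indexed conditions and the two greedy step functions)
def pvPb (cl : List Int) (bp : Int × Int) (j : Nat) : Bool :=
  decide ((cl.getD (j + 1) 0, cl.getD (j + 2) 0) = bp)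

def pvPb0 (cl : List Int) (bp : Int × Int) (k : Nat) : Bool :=
  decide ((cl.getD k 0, cl.getD (k + 1) 0) = bp)

def pvQd (cl : List Int) (bp : Int × Int) (j : Nat) : Bool :=
  decide ((cl.getD j 0, cl.getD (j + 1) 0, cl.getD (j + 2) 0, cl.getD (j + 3) 0)
            = (bp.1, bp.2, bp.1, bp.2))

def pvG3 (p : Int × List Int) (i : Nat) : Int × List Int :=
  if (i : Int) - PySem.List.pyGetD p.2 (-1) 0 > 3 then (p.1 + 1, p.2 ++ [(i : Int)]) else p

def pvGB (p : Int × Int) (i : Nat) : Int × Int :=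
  if (i : Int) - p.2 > 3 then (p.1 + 1, (i : Int)) else p

-- the enumerated 4-window zip, as a map over window indices
theorem pvWindows_eq (cl : List Int) :
    pvWindows cl = (List.range (cl.length - 3)).map
      (fun i => (cl.getD i 0, cl.getD (i + 1) 0, cl.getD (i + 2) 0, cl.getD (i + 3) 0)) := by
  apply List.ext_getElem
  · simp [pvWindows]; omega
  · intro i h1 h2
    have hi : i < cl.length - 3 := by simpa using h2
    simp [pvWindows, List.getElem_zip, List.getElem_drop, List.getD_eq_getElem?_getD,
      List.getElem?_eq_getElem (by omega : i < cl.length),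
      List.getElem?_eq_getElem (by omega : i + 1 < cl.length),
      List.getElem?_eq_getElem (by omega : i + 2 < cl.length),
      List.getElem?_eq_getElem (by omega : i + 3 < cl.length)]
    exact ⟨by congr 1; omega, by congr 1; omega⟩

theorem enum_map_range {α : Type} (f : Nat → α) (m : Nat) :
    PySem.List.enumerate ((List.range m).map f) 0
      = (List.range m).map (fun (i : Nat) => ((i : Int), f i)) := by
  induction m with
  | zero => rfl
  | succ k ih =>
    rw [List.range_succ, List.map_append, List.map_append, PySem.List.enumerate_append, ih]
    simp [PySem.List.enumerate]

theorem foldl_prod3 {ι α β γ : Type} (l : List ι) (f1 : α → ι → α) (f2 : β → ι → β)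
    (f3 : γ → ι → γ) (a : α) (b : β) (c : γ) :
    l.foldl (fun s i => (f1 s.1 i, f2 s.2.1 i, f3 s.2.2 i)) (a, b, c)
      = (l.foldl f1 a, l.foldl f2 b, l.foldl f3 c) := by
  induction l generalizing a b c with
  | nil => rfl
  | cons x t ih => simp [List.foldl_cons, ih]

theorem filter_range_shrink (p : Nat → Bool) (m n : Nat) (hmn : m ≤ n)
    (hp : ∀ k, p k = true → k < m) :
    (List.range n).filter p = (List.range m).filter p := by
  obtain ⟨t, rfl⟩ := Nat.exists_eq_add_of_le hmn
  rw [List.range_add, List.filter_append]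
  have h0 : ((List.range t).map (fun x => m + x)).filter p = [] := by
    refine List.filter_eq_nil_iff.2 ?_
    intro a ha hpa
    obtain ⟨x, _, rfl⟩ := List.mem_map.1 ha
    exact absurd (hp _ hpa) (by omega)
  rw [h0, List.append_nil]

theorem foldl_modify_counter (l : List Nat) (e : Nat → Int) :
    l.foldl (fun (d : PySem.Dict Int Int) i => d.modify (e i) 0 (· + 1)) PySem.Dict.empty
      = PySem.Dict.counter (l.map e) := by
  rw [PySem.Dict.counter_eq_foldl, List.foldl_map]

theorem foldl_and_filter {ι σ : Type} (l : List ι) (p : ι → Bool) (c : σ → ι → Prop)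
    [inst : ∀ s i, Decidable (c s i)] (u : σ → ι → σ) (init : σ) :
    l.foldl (fun s i => if p i = true ∧ c s i then u s i else s) init
      = (l.filter p).foldl (fun s i => if c s i then u s i else s) init := by
  rw [List.foldl_filter]
  congr 1
  funext s i
  by_cases h : p i = true <;> by_cases h2 : c s i <;> simp [h, h2]

theorem pyGetD_concat_neg_one (xs : List Int) (x : Int) :
    PySem.List.pyGetD (xs ++ [x]) (-1) 0 = x := by
  simp [PySem.List.pyGetD, PySem.List.pyGet?, PySem.List.pyIdx?]

-- the greedy scan keeps only the last accepted window index: control list vs scalar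
theorem greedy_rel (l : List Nat) : ∀ (cnt : Int) (ctrl : List Int) (x : Int),
    (l.foldl pvG3 (cnt, ctrl ++ [x])).1 = (l.foldl pvGB (cnt, x)).1 := by
  induction l with
  | nil => intro cnt ctrl x; rfl
  | cons i t ih =>
    intro cnt ctrl x
    simp only [List.foldl_cons, pvG3, pvGB, pyGetD_concat_neg_one]
    by_cases h : (i : Int) - x > 3
    · simp only [h, if_pos]
      exact ih (cnt + 1) (ctrl ++ [x]) (i : Int)
    · simp only [h, if_neg, not_false_iff]
      exact ih cnt ctrl x

def pvF1 (cl : List Int) (bp : Int × Int) (enc : List (Int × Int))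
    (d : PySem.Dict Int Int) (i : Nat) : PySem.Dict Int Int :=
  if pvPb cl bp i = true then d.modify (pvEnc enc (cl.getD i 0)) 0 (· + 1) else d

def pvF2 (cl : List Int) (bp : Int × Int) (enc : List (Int × Int))
    (d : PySem.Dict Int Int) (i : Nat) : PySem.Dict Int Int :=
  if pvPb cl bp i = true then d.modify (pvEnc enc (cl.getD (i + 3) 0)) 0 (· + 1) else d

def pvF3 (cl : List Int) (bp : Int × Int) (p : Int × List Int) (i : Nat) : Int × List Int :=
  if pvQd cl bp i = true ∧ (i : Int) - PySem.List.pyGetD p.2 (-1) 0 > 3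
    then (p.1 + 1, p.2 ++ [(i : Int)]) else p

-- normal form of port A: three independent folds over the window indices
theorem A_norm (cl : List Int) (bp : Int × Int) (enc : List (Int × Int)) :
    findall_contexts_list cl bp enc =
      ((PySem.Dict.counter (((List.range (cl.length - 3)).filter (pvPb cl bp)).map
          (fun j => pvEnc enc (cl.getD j 0)))).items,
       (PySem.Dict.counter (((List.range (cl.length - 3)).filter (pvPb cl bp)).map
          (fun j => pvEnc enc (cl.getD (j + 3) 0)))).items,
       ((((List.range (cl.length - 3)).filter (pvQd cl bp)).foldl pvG3 (0, [-4])).1)) := by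
  unfold findall_contexts_list
  rw [pvWindows_eq, enum_map_range, List.foldl_map]
  have hstep : (fun (st : PySem.Dict Int Int × PySem.Dict Int Int × Int × List Int) (i : Nat) =>
      (fun st (jw : Int × Int × Int × Int × Int) =>
        let j := jw.1; let a := jw.2.1; let b := jw.2.2.1; let c := jw.2.2.2.1; let d := jw.2.2.2.2
        let lr := if (b, c) = bp
          then (st.1.modify (pvEnc enc a) 0 (· + 1), st.2.1.modify (pvEnc enc d) 0 (· + 1))
          else (st.1, st.2.1)
        let cc := if (a, b, c, d) = (bp.1, bp.2, bp.1, bp.2) ∧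
                     j - PySem.List.pyGetD st.2.2.2 (-1) 0 > 3
          then (st.2.2.1 + 1, st.2.2.2 ++ [j]) else (st.2.2.1, st.2.2.2)
        (lr.1, lr.2, cc.1, cc.2)) st
        ((i : Int), cl.getD i 0, cl.getD (i + 1) 0, cl.getD (i + 2) 0, cl.getD (i + 3) 0))
      = (fun st i => (pvF1 cl bp enc st.1 i, pvF2 cl bp enc st.2.1 i, pvF3 cl bp st.2.2 i)) := by
    funext st i
    simp only [pvF1, pvF2, pvF3, pvPb, pvQd, decide_eq_true_eq]
    split_ifs <;> rfl
  rw [hstep, foldl_prod3 (List.range (cl.length - 3)) (pvF1 cl bp enc) (pvF2 cl bp enc)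
    (pvF3 cl bp) PySem.Dict.empty PySem.Dict.empty ((0 : Int), [(-4 : Int)])]
  have hc1 : (List.range (cl.length - 3)).foldl (pvF1 cl bp enc) PySem.Dict.empty
      = PySem.Dict.counter (((List.range (cl.length - 3)).filter (pvPb cl bp)).map
          (fun j => pvEnc enc (cl.getD j 0))) := by
    rw [← foldl_modify_counter, List.foldl_filter]; rfl
  have hc2 : (List.range (cl.length - 3)).foldl (pvF2 cl bp enc) PySem.Dict.empty
      = PySem.Dict.counter (((List.range (cl.length - 3)).filter (pvPb cl bp)).map
          (fun j => pvEnc enc (cl.getD (j + 3) 0))) := by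
    rw [← foldl_modify_counter, List.foldl_filter]; rfl
  have h3 : (List.range (cl.length - 3)).foldl (pvF3 cl bp) ((0 : Int), [(-4 : Int)])
      = ((List.range (cl.length - 3)).filter (pvQd cl bp)).foldl pvG3 (0, [-4]) := by
    unfold pvF3
    rw [foldl_and_filter]
    rfl
  rw [hc1, hc2, h3]

-- normal form of port B: the same three folds
theorem B_norm (cl : List Int) (bp : Int × Int) (enc : List (Int × Int)) :
    findall_contexts_list_alt cl bp enc =
      ((PySem.Dict.counter (((List.range (cl.length - 3)).filter (pvPb cl bp)).map
          (fun j => pvEnc enc (cl.getD j 0)))).items,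
       (PySem.Dict.counter (((List.range (cl.length - 3)).filter (pvPb cl bp)).map
          (fun j => pvEnc enc (cl.getD (j + 3) 0)))).items,
       ((((List.range (cl.length - 3)).filter (pvQd cl bp)).foldl pvGB (0, -4)).1)) := by
  unfold findall_contexts_list_alt
  dsimp only
  -- pass 1 list
  have hS : (PySem.List.pyRange 0 ((cl.length : Int) - 1) 1).filter
      (fun i => decide ((PySem.List.pyGetD cl i 0, PySem.List.pyGetD cl (i + 1) 0) = bp))
      = ((List.range (cl.length - 1)).filter (pvPb0 cl bp)).map (fun (k : Nat) => (k : Int)) := by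
    rw [PySem.List.pyRange_one]
    have ht : (((cl.length : Int) - 1) - 0).toNat = cl.length - 1 := by omega
    rw [ht, List.filter_map]
    simp only [Function.comp_def, zero_add]
    refine congrArg _ (List.filter_congr ?_)
    intro k _
    show decide ((PySem.List.pyGetD cl ((k : Int)) 0, PySem.List.pyGetD cl ((k : Int) + 1) 0) = bp)
        = pvPb0 cl bp k
    rw [show ((k : Int) + 1) = ((k + 1 : Nat) : Int) by push_cast; ring,
      PySem.List.pyGetD_natCast, PySem.List.pyGetD_natCast]
    rfl
  -- pass 2 list
  have hI : (PySem.List.pyRange 1 ((cl.length : Int) - 2) 1).filter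
      (fun i => decide ((PySem.List.pyGetD cl i 0, PySem.List.pyGetD cl (i + 1) 0) = bp))
      = ((List.range (cl.length - 3)).filter (pvPb cl bp)).map (fun (k : Nat) => ((1 : Int) + (k : Int))) := by
    rw [PySem.List.pyRange_one]
    have ht : (((cl.length : Int) - 2) - 1).toNat = cl.length - 3 := by omega
    rw [ht, List.filter_map]
    simp only [Function.comp_def]
    refine congrArg _ (List.filter_congr ?_)
    intro k _
    show decide ((PySem.List.pyGetD cl ((1 : Int) + (k : Int)) 0,
        PySem.List.pyGetD cl ((1 : Int) + (k : Int) + 1) 0) = bp) = pvPb cl bp k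
    rw [show ((1 : Int) + (k : Int) + 1) = ((k + 2 : Nat) : Int) by push_cast; ring,
      show ((1 : Int) + (k : Int)) = ((k + 1 : Nat) : Int) by push_cast; ring,
      PySem.List.pyGetD_natCast, PySem.List.pyGetD_natCast]
    rfl
  rw [hS, hI]
  -- the two Counter argument lists
  have hL : (((List.range (cl.length - 3)).filter (pvPb cl bp)).map (fun (k : Nat) => ((1 : Int) + (k : Int)))).map
        (fun i => pvEnc enc (PySem.List.pyGetD cl (i - 1) 0))
      = ((List.range (cl.length - 3)).filter (pvPb cl bp)).map (fun j => pvEnc enc (cl.getD j 0)) := by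
    rw [List.map_map]
    refine List.map_congr_left ?_
    intro k _
    show pvEnc enc (PySem.List.pyGetD cl ((1 : Int) + (k : Int) - 1) 0) = pvEnc enc (cl.getD k 0)
    rw [show ((1 : Int) + (k : Int) - 1) = ((k : Nat) : Int) by ring,
      PySem.List.pyGetD_natCast]
  have hR : (((List.range (cl.length - 3)).filter (pvPb cl bp)).map (fun (k : Nat) => ((1 : Int) + (k : Int)))).map
        (fun i => pvEnc enc (PySem.List.pyGetD cl (i + 2) 0))
      = ((List.range (cl.length - 3)).filter (pvPb cl bp)).map (fun j => pvEnc enc (cl.getD (j + 3) 0)) := by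
    rw [List.map_map]
    refine List.map_congr_left ?_
    intro k _
    show pvEnc enc (PySem.List.pyGetD cl ((1 : Int) + (k : Int) + 2) 0) = pvEnc enc (cl.getD (k + 3) 0)
    rw [show ((1 : Int) + (k : Int) + 2) = ((k + 3 : Nat) : Int) by push_cast; ring,
      PySem.List.pyGetD_natCast]
  rw [hL, hR]
  -- pass 3: the greedy fold
  refine Prod.ext rfl (Prod.ext rfl ?_)
  rw [List.foldl_map]
  have hmem : ∀ k : Nat, (((k : Int) + 2) ∈ ((List.range (cl.length - 1)).filter (pvPb0 cl bp)).map
      (fun (j : Nat) => (j : Int))) ↔ (k + 2) ∈ (List.range (cl.length - 1)).filter (pvPb0 cl bp) := by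
    intro k
    rw [List.mem_map]
    constructor
    · rintro ⟨a, ha, hcast⟩
      have : a = k + 2 := by omega
      subst this; exact ha
    · intro h; exact ⟨k + 2, h, by push_cast; ring⟩
  have hstep2 : (fun (p : Int × Int) (k : Nat) =>
        if ((k : Int) + 2) ∈ ((List.range (cl.length - 1)).filter (pvPb0 cl bp)).map
              (fun (j : Nat) => (j : Int)) ∧ (k : Int) - p.2 > 3
          then (p.1 + 1, (k : Int)) else p)
      = (fun (p : Int × Int) (k : Nat) =>
        if (decide ((k + 2) ∈ (List.range (cl.length - 1)).filter (pvPb0 cl bp))) = true ∧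
            ((k : Int) - p.2 > 3) then (p.1 + 1, (k : Int)) else p) := by
    funext p k
    by_cases h : (k + 2) ∈ (List.range (cl.length - 1)).filter (pvPb0 cl bp) <;>
      by_cases h2 : (k : Int) - p.2 > 3 <;>
      simp [h, h2, hmem k]
  rw [hstep2, foldl_and_filter]
  have hlist : ((List.range (cl.length - 1)).filter (pvPb0 cl bp)).filter
        (fun k => decide ((k + 2) ∈ (List.range (cl.length - 1)).filter (pvPb0 cl bp)))
      = (List.range (cl.length - 3)).filter (pvQd cl bp) := by
    rw [List.filter_filter]
    rw [filter_range_shrink _ (cl.length - 3) (cl.length - 1) (by omega)]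
    · refine List.filter_congr ?_
      intro k hk
      rw [List.mem_range] at hk
      simp only [pvPb0, pvQd, List.mem_filter, List.mem_range,
        decide_eq_true_eq, Prod.ext_iff]
      rw [← Bool.decide_and, decide_eq_decide]
      constructor
      · rintro ⟨⟨hb, h3, h4⟩, h1, h2⟩
        exact ⟨h1, h2, h3, by simpa using h4⟩
      · rintro ⟨h1, h2, h3, h4⟩
        exact ⟨⟨by omega, h3, by simpa using h4⟩, h1, h2⟩
    · intro k hk
      simp only [List.mem_filter, List.mem_range, Bool.and_eq_true, decide_eq_true_eq] at hk
      omega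
  rw [hlist]
  rfl

-- ===== VERDICT (by name: the statement is the Claim_ definition above) =====
theorem findall_contexts_list_spec : Claim_equal_findall_contexts_list := by
  intro cl bp enc _ _
  unfold Spec_findall_contexts_list
  rw [A_norm, B_norm]
  refine Prod.ext rfl (Prod.ext rfl ?_)
  show ((((List.range (cl.length - 3)).filter (pvQd cl bp)).foldl pvG3 (0, [-4])).1)
      = ((((List.range (cl.length - 3)).filter (pvQd cl bp)).foldl pvGB (0, -4)).1)
  have := greedy_rel (((List.range (cl.length - 3)).filter (pvQd cl bp))) 0 [] (-4)
  simpa using this
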